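-- pv_equiv track=rewrite | github.com/solitaryTian/RLPCM | RLCFM/SDXL/train_pcm_base_model_sdxl_adv_RL.py | get_rank
-- ===== SOURCE A (Python) =====
-- from itertools import permutations
--
-- def get_rank(lst):
--     # 将列表中的元素与其索引配对
--     indexed_lst = [(value, idx) for idx, value in enumerate(lst)]
--
--     # 按值升序排序
--     sorted_lst = sorted(indexed_lst, key=lambda x: x[0])
--
--     # 创建一个排名列表
--     rank = [0] * len(lst)
--
--     # 分配排名
--     for i, (_, idx) in enumerate(sorted_lst):
--         rank[idx] = str(i)  # 将排名转换为字符串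
--     perms = list(permutations('0123'))
--     mapping = {''.join(p): i+1 for i, p in enumerate(perms)}
--     return mapping[''.join(rank)]
-- ===== SOURCE B (Python) =====
-- def get_rank(lst):
--     a, b, c, d = lst
--     # Stable rank of the first three elements (ties broken by position, as a stable sort would).
--     ra = (b < a) + (c < a) + (d < a)
--     rb = (a <= b) + (c < b) + (d < b)
--     rc = (a <= c) + (b <= c) + (d < c)
--     # 1-based lexicographic rank of the permutation (the last rank digit is forced).
--     return 6 * ra + 2 * (rb - (ra < rb)) + (rc - (ra < rc) - (rb < rc)) + 1
-- ===== Notes on version B (the rewrite author's own statement) =====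
-- stated objective: simpler
-- what changed: B replaces A's stable sort plus the precomputed dictionary of all 24 permutations of '0123' by unpacking the four elements and computing the 1-based lexicographic (Lehmer) rank in closed form from comparison counts; Pre_ excludes lists whose length is not 4, on which A raises KeyError (the rank string is not a key of the 4-permutation mapping) and B's tuple unpacking raises ValueError.
import Mathlib
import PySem

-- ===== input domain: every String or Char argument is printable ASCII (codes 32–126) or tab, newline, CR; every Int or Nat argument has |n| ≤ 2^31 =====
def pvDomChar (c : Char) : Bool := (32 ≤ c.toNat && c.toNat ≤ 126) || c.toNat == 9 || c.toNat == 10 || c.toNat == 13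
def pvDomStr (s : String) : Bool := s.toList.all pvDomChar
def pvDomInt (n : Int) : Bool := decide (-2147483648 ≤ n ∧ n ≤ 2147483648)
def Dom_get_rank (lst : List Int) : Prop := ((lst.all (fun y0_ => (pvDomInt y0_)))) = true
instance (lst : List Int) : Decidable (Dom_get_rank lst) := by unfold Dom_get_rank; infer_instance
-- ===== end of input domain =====

-- B replaces A's sort + all-24-permutations dictionary by a closed-form Lehmer
-- (lexicographic) rank computed from comparison counts of the four unpacked elements.

-- ===== PORT A =====
-- itertools.permutations(xs): for each i, element xs[i] followed by permutations of the rest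
-- (CPython's index-lexicographic order); fuel = length, exact for the lists it is called on.
def pyPermsAux : Nat → List Char → List (List Char)
  | 0, _ => [[]]
  | n+1, xs =>
      (PySem.List.enumerate xs 0).flatMap
        (fun p => (pyPermsAux n (xs.take p.1.toNat ++ xs.drop (p.1.toNat + 1))).map (p.2 :: ·))

def pyPerms (xs : List Char) : List (List Char) := pyPermsAux xs.length xs

def get_rank (lst : List Int) : Int :=
  let indexed_lst := (PySem.List.enumerate lst 0).map (fun p => (p.2, p.1))
  let sorted_lst := PySem.List.sorted indexed_lst (fun x => x.1) false
  -- rank = [0]*len(lst): every cell is overwritten by the loop below (sorted_lst carries each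
  -- index exactly once), so the never-read int placeholder 0 is modelled by "0"
  let rank0 : List String := List.replicate lst.length "0"
  -- rank[idx] = str(i); idx comes from enumerate so idx ≥ 0 and .toNat is exact
  let rank := (PySem.List.enumerate sorted_lst 0).foldl
      (fun r p => r.set p.2.2.toNat (PySem.Int.toStr p.1)) rank0
  let perms := pyPerms ['0', '1', '2', '3']
  let mapping : PySem.Dict String Int :=
    (PySem.List.enumerate perms 0).foldl
      (fun d p => d.insert (String.ofList p.2) (p.1 + 1)) PySem.Dict.empty
  -- mapping[''.join(rank)]: KeyError = none, excluded by Pre_; 0 is unreachable inside Pre_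
  (mapping.get? (PySem.Str.join "" rank)).getD 0

-- ===== PORT B =====
def get_rank_alt (lst : List Int) : Int :=
  -- a, b, c, d = lst: raises ValueError unless the length is 4 (excluded by Pre_); 0 unreachable
  match lst with
  | [a, b, c, d] =>
    let ra : Int := (if b < a then 1 else 0) + (if c < a then 1 else 0) + (if d < a then 1 else 0)
    let rb : Int := (if a ≤ b then 1 else 0) + (if c < b then 1 else 0) + (if d < b then 1 else 0)
    let rc : Int := (if a ≤ c then 1 else 0) + (if b ≤ c then 1 else 0) + (if d < c then 1 else 0)
    6 * ra + 2 * (rb - (if ra < rb then 1 else 0))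
      + (rc - (if ra < rc then 1 else 0) - (if rb < rc then 1 else 0)) + 1
  | _ => 0

-- ===== PRECONDITION & SPEC =====
-- A raises KeyError on every list whose length is not 4 (the rank string is then not a key of
-- the 4-permutation mapping); Pre_ admits exactly the inputs on which A returns.
def Pre_get_rank (lst : List Int) : Prop := lst.length = 4
instance (lst : List Int) : Decidable (Pre_get_rank lst) := by unfold Pre_get_rank; infer_instance
def pvWitness_get_rank : List Int := [3, 1, 2, 0]

def Spec_get_rank (lst : List Int) (out : Int) : Prop := out = get_rank_alt lst
instance (lst : List Int) (out : Int) : Decidable (Spec_get_rank lst out) := by unfold Spec_get_rank; infer_instance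

-- ===== CLAIM (what is proved, stated in full; the proofs are below) =====
def Claim_equal_get_rank : Prop := ∀ (lst : List Int), Dom_get_rank lst → Pre_get_rank lst → Spec_get_rank lst (get_rank lst)

-- ===== LEMMAS AND PROOFS =====
set_option maxHeartbeats 4000000 in
theorem get_rank_key (a b c d : Int) : get_rank [a, b, c, d] = get_rank_alt [a, b, c, d] := by
  have tri : ∀ x y : Int, (x < y ∧ ¬ y ≤ x) ∨ (¬ x < y ∧ y ≤ x) := by omega
  rcases tri b a with ⟨h1, h1'⟩ | ⟨h1, h1'⟩ <;>
    rcases tri c a with ⟨h2, h2'⟩ | ⟨h2, h2'⟩ <;>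
    rcases tri c b with ⟨h3, h3'⟩ | ⟨h3, h3'⟩ <;>
    rcases tri d a with ⟨h4, h4'⟩ | ⟨h4, h4'⟩ <;>
    rcases tri d b with ⟨h5, h5'⟩ | ⟨h5, h5'⟩ <;>
    rcases tri d c with ⟨h6, h6'⟩ | ⟨h6, h6'⟩ <;>
    first
      | (exfalso; omega)
      | (simp only [get_rank, get_rank_alt, PySem.List.sorted, PySem.List.insertBy,
        PySem.List.enumerate,
        List.foldl_cons, List.foldl_nil, List.map_cons, List.map_nil,
        List.length_cons, List.length_nil, List.replicate,
        h1, h1', h2, h2', h3, h3', h4, h5, h6,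
        decide_true, decide_false, Bool.false_eq_true, if_true, if_false,
        Int.reduceLT, Int.reduceAdd, Int.reduceSub, Int.reduceMul,
        Int.reduceToNat, Nat.reduceAdd]
         decide)

-- ===== VERDICT (by name: the statement is the Claim_ definition above) =====
theorem get_rank_spec : Claim_equal_get_rank := by
  intro lst _ hpre
  unfold Spec_get_rank
  match lst, hpre with
  | [a, b, c, d], _ => exact get_rank_key a b c d
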